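-- pv_equiv track=rewrite | github.com/chrisgzj/LeetCode | DailyChallengeDec2020.py | sizeOfDecoded
-- ===== SOURCE A (Python) =====
-- def sizeOfDecoded(S):
--     """Calculates the size of the decoded string without computing it"""
--     digits = "23456789"
--     decoded_size = 0
--     for char in S:
--         if char in digits:
--             decoded_size = decoded_size * int(char)
--         else:
--             decoded_size += 1
--     return decoded_size
-- ===== SOURCE B (Python) =====
-- def sizeOfDecoded(S):
--     """Right-to-left pass: keep a multiplier (product of digits seen so far
--     from the right) and a total; each non-digit adds the current multiplier."""
--     mult = 1
--     total = 0
--     for char in reversed(S):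
--         if char in "23456789":
--             mult *= int(char)
--         else:
--             total += mult
--     return total
-- ===== Notes on version B (the rewrite author's own statement) =====
-- stated objective: alternative
-- what changed: B replaces A's forward multiply-or-increment on a single accumulator by a single right-to-left pass maintaining a running multiplier (product of digits to the right) and a separate total that each non-digit increases by the multiplier.
import Mathlib
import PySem

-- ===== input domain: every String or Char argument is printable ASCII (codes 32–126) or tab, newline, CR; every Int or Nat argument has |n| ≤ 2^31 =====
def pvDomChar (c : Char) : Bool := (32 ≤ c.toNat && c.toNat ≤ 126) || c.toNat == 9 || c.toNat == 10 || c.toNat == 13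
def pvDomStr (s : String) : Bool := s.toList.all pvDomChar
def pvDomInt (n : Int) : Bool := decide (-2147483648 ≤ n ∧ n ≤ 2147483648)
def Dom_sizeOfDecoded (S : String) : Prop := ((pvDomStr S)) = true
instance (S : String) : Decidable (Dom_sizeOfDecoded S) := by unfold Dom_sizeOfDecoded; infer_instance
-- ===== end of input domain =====

-- B is an alternative single right-to-left pass keeping a multiplier and a total,
-- instead of A's forward multiply-or-increment on one accumulator.

-- ===== PORT A =====
-- 'char in "23456789"' of A's code
def pvIsDigit29 (c : Char) : Bool := c ∈ "23456789".toList
-- int(char) for a char of "23456789": exact there (comment: ASCII code minus 48)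
def pvDigitVal (c : Char) : Int := (c.toNat : Int) - 48

def sizeOfDecoded (S : String) : Int :=
  S.toList.foldl
    (fun decoded_size char =>
      if pvIsDigit29 char then decoded_size * pvDigitVal char else decoded_size + 1)
    0

-- ===== PORT B =====
def sizeOfDecoded_alt (S : String) : Int :=
  (S.toList.reverse.foldl
    (fun (st : Int × Int) char =>
      if pvIsDigit29 char then (st.1 * pvDigitVal char, st.2) else (st.1, st.2 + st.1))
    (1, 0)).2

-- ===== PRECONDITION & SPEC =====
def Spec_sizeOfDecoded (S : String) (out : Int) : Prop := out = sizeOfDecoded_alt S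
instance (S : String) (out : Int) : Decidable (Spec_sizeOfDecoded S out) := by unfold Spec_sizeOfDecoded; infer_instance

-- ===== CLAIM (what is proved, stated in full; the proofs are below) =====
def Claim_equal_sizeOfDecoded : Prop := ∀ (S : String), Dom_sizeOfDecoded S → Spec_sizeOfDecoded S (sizeOfDecoded S)

-- ===== LEMMAS AND PROOFS =====
-- product of the digit values in l (M) and the intended decoded size (T), by structural recursion
def pvM (l : List Char) : Int :=
  match l with
  | [] => 1
  | c :: l => if pvIsDigit29 c then pvDigitVal c * pvM l else pvM l

def pvT (l : List Char) : Int :=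
  match l with
  | [] => 0
  | c :: l => if pvIsDigit29 c then pvT l else pvM l + pvT l

-- A's fold is affine in its accumulator: result = a * M l + T l
theorem pvA_char (l : List Char) (a : Int) :
    l.foldl (fun d c => if pvIsDigit29 c then d * pvDigitVal c else d + 1) a
      = a * pvM l + pvT l := by
  induction l generalizing a with
  | nil => simp [pvM, pvT]
  | cons c l ih =>
    simp only [List.foldl_cons, ih, pvM, pvT]
    by_cases h : pvIsDigit29 c = true <;> simp [h] <;> ring

-- B's fold over the reverse: multiplier scales by M, total gains mult * T
theorem pvB_char (l : List Char) (m t : Int) :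
    l.reverse.foldl
      (fun (st : Int × Int) c =>
        if pvIsDigit29 c then (st.1 * pvDigitVal c, st.2) else (st.1, st.2 + st.1))
      (m, t)
      = (m * pvM l, t + m * pvT l) := by
  induction l generalizing m t with
  | nil => simp [pvM, pvT]
  | cons c l ih =>
    simp only [List.reverse_cons, List.foldl_append, ih, List.foldl_cons, List.foldl_nil,
      pvM, pvT]
    by_cases h : pvIsDigit29 c = true <;> simp [h] <;> ring

-- ===== VERDICT (by name: the statement is the Claim_ definition above) =====
theorem sizeOfDecoded_spec : Claim_equal_sizeOfDecoded := by
  intro S _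
  unfold Spec_sizeOfDecoded sizeOfDecoded sizeOfDecoded_alt
  rw [pvA_char, pvB_char]
  ring
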